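-- pv_equiv track=rewrite | github.com/fayfaywcl/AIJournal | imagetovideo.py | plan_clip_durations
-- ===== SOURCE A (Python) =====
-- MODEL_ALLOWED_DURATIONS = {
--     "gen4_turbo": (5, 10),
--     "gen4.5": tuple(range(2, 11)),
--     "gen3a_turbo": (5, 10),
--     "veo3": (8,),
--     "veo3.1": (4, 6, 8),
--     "veo3.1_fast": (4, 6, 8),
-- }
--
-- def split_total_duration(total_duration: int, num_clips: int) -> list[int]:
--     if num_clips < 1:
--         return []
--
--     if total_duration < num_clips:
--         raise SystemExit(
--             f"--total-duration must be at least {num_clips} second(s) when generating {num_clips} clip(s)."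
--         )
--
--     base_duration = total_duration // num_clips
--     remainder = total_duration % num_clips
--     durations = [base_duration] * num_clips
--
--     for index in range(remainder):
--         durations[index] += 1
--
--     return durations
--
-- def plan_clip_durations(total_duration: int, num_clips: int, model: str) -> list[int]:
--     if num_clips < 1:
--         return []
--
--     requested = split_total_duration(max(total_duration, num_clips), num_clips)
--     allowed_durations = MODEL_ALLOWED_DURATIONS.get(model)
--
--     if not allowed_durations:
--         return requested
--
--     planned: list[int] = []
--     for duration in requested:
--         selected = allowed_durations[-1]
--         for allowed in allowed_durations:
--             if duration <= allowed:
--                 selected = allowed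
--                 break
--         planned.append(selected)
--
--     return planned
-- ===== SOURCE B (Python) =====
-- MODEL_ALLOWED_DURATIONS = {
--     "gen4_turbo": (5, 10),
--     "gen4.5": tuple(range(2, 11)),
--     "gen3a_turbo": (5, 10),
--     "veo3": (8,),
--     "veo3.1": (4, 6, 8),
--     "veo3.1_fast": (4, 6, 8),
-- }
--
--
-- def _snap(allowed, value):
--     fits = [a for a in allowed if value <= a]
--     return min(fits) if fits else allowed[-1]
--
--
-- def plan_clip_durations(total_duration: int, num_clips: int, model: str) -> list[int]:
--     if num_clips < 1:
--         return []
--     total = max(total_duration, num_clips)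
--     base, remainder = divmod(total, num_clips)
--     allowed = MODEL_ALLOWED_DURATIONS.get(model)
--     if not allowed:
--         return [base + 1] * remainder + [base] * (num_clips - remainder)
--     return [_snap(allowed, base + 1)] * remainder + [_snap(allowed, base)] * (num_clips - remainder)
-- ===== Notes on version B (the rewrite author's own statement) =====
-- stated objective: alternative
-- what changed: Instead of building the [base]*n list, incrementing its first remainder slots and then scanning the allowed tuple per clip, B computes base and remainder by divmod, snaps only the two distinct requested values (min of the allowed values >= value, else the last) and assembles the answer as two replicated blocks.
import Mathlib
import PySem

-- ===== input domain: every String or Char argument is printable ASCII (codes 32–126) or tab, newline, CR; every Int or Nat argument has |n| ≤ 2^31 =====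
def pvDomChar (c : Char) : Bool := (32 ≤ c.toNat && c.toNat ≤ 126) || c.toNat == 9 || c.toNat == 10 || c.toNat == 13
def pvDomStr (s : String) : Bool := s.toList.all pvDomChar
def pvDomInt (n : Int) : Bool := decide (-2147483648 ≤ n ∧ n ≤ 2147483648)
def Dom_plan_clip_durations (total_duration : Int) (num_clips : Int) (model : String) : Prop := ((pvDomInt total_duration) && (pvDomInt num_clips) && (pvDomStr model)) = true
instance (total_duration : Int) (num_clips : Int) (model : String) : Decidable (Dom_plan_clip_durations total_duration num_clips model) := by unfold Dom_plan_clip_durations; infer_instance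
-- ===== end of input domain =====

-- B replaces the per-clip scan over the allowed tuple by snapping only the two distinct
-- requested values (base and base+1) and replicating two blocks (alternative decomposition).

-- ===== PORT A =====
def MODEL_ALLOWED_DURATIONS : PySem.Dict String (List Int) :=
  PySem.Dict.ofList
    [("gen4_turbo", [5, 10]),
     ("gen4.5", [2, 3, 4, 5, 6, 7, 8, 9, 10]),
     ("gen3a_turbo", [5, 10]),
     ("veo3", [8]),
     ("veo3.1", [4, 6, 8]),
     ("veo3.1_fast", [4, 6, 8])]

-- none = the SystemExit raise (unreachable from plan_clip_durations, which passes max(td, n))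
def split_total_duration (total_duration : Int) (num_clips : Int) : Option (List Int) :=
  if num_clips < 1 then some []
  else if total_duration < num_clips then none
  else
    let base_duration := PySem.Int.floordiv total_duration num_clips
    let remainder := PySem.Int.mod total_duration num_clips
    let durations := PySem.List.pyRepeat [base_duration] num_clips
    -- for index in range(remainder): durations[index] += 1   (index always in range: exact)
    some ((PySem.List.pyRange 0 remainder 1).foldl
      (fun ds index => PySem.List.pySetD ds index (PySem.List.pyGetD ds index 0 + 1)) durations)

-- inner 'for allowed in allowed_durations: if duration <= allowed: selected = allowed; break'
def selectLoop (duration : Int) : List Int → Int → Int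
  | [], selected => selected
  | a :: rest, selected => if duration ≤ a then a else selectLoop duration rest selected

def plan_clip_durations (total_duration : Int) (num_clips : Int) (model : String) : List Int :=
  if num_clips < 1 then []
  else
    -- the none branch is unreachable: max total_duration num_clips ≥ num_clips
    let requested := (split_total_duration (max total_duration num_clips) num_clips).getD []
    match MODEL_ALLOWED_DURATIONS.get? model with
    | none => requested
    | some allowed_durations =>
      if allowed_durations.isEmpty then requested
      else
        -- allowed_durations[-1] exact: list is nonempty here
        requested.foldl
          (fun planned duration =>
            planned ++ [selectLoop duration allowed_durations
                          (PySem.List.pyGetD allowed_durations (-1) 0)]) []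

-- ===== PORT B =====
def snap (allowed : List Int) (value : Int) : Int :=
  let fits := allowed.filter (fun a => value ≤ a)
  if fits.isEmpty then PySem.List.pyGetD allowed (-1) 0   -- allowed[-1]: nonempty at call sites
  else (PySem.List.min? fits (fun x => x)).getD 0         -- min(fits): fits nonempty here

def plan_clip_durations_alt (total_duration : Int) (num_clips : Int) (model : String) : List Int :=
  if num_clips < 1 then []
  else
    let total := max total_duration num_clips
    let base := PySem.Int.floordiv total num_clips
    let remainder := PySem.Int.mod total num_clips
    match MODEL_ALLOWED_DURATIONS.get? model with
    | none =>
        PySem.List.pyRepeat [base + 1] remainder ++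
          PySem.List.pyRepeat [base] (num_clips - remainder)
    | some allowed =>
      if allowed.isEmpty then
        PySem.List.pyRepeat [base + 1] remainder ++
          PySem.List.pyRepeat [base] (num_clips - remainder)
      else
        PySem.List.pyRepeat [snap allowed (base + 1)] remainder ++
          PySem.List.pyRepeat [snap allowed base] (num_clips - remainder)

-- ===== PRECONDITION & SPEC =====
def Spec_plan_clip_durations (total_duration : Int) (num_clips : Int) (model : String) (out : List Int) : Prop := out = plan_clip_durations_alt total_duration num_clips model
instance (total_duration : Int) (num_clips : Int) (model : String) (out : List Int) : Decidable (Spec_plan_clip_durations total_duration num_clips model out) := by unfold Spec_plan_clip_durations; infer_instance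

-- ===== CLAIM (what is proved, stated in full; the proofs are below) =====
def Claim_equal_plan_clip_durations : Prop := ∀ (total_duration : Int) (num_clips : Int) (model : String), Dom_plan_clip_durations total_duration num_clips model → Spec_plan_clip_durations total_duration num_clips model (plan_clip_durations total_duration num_clips model)

-- ===== LEMMAS AND PROOFS =====

-- A's increment loop produces two replicated blocks.
lemma increment_loop_eq (base : Int) (n r : Nat) (h : r ≤ n) :
    (PySem.List.pyRange 0 (r : Int) 1).foldl
      (fun ds index => PySem.List.pySetD ds index (PySem.List.pyGetD ds index 0 + 1))
      (List.replicate n base)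
    = List.replicate r (base + 1) ++ List.replicate (n - r) base := by
  induction r with
  | zero => simp [PySem.List.pyRange]
  | succ r ih =>
    have hr : r ≤ n := by omega
    have hstep : (PySem.List.pyRange 0 ((r : Nat) + 1 : Int) 1)
        = PySem.List.pyRange 0 (r : Int) 1 ++ [(r : Int)] :=
      PySem.List.pyRange_one_succ_right (by positivity)
    have hcast : ((r + 1 : Nat) : Int) = ((r : Nat) : Int) + 1 := by push_cast; ring
    rw [hcast, hstep, List.foldl_append, ih hr]
    simp only [List.foldl]
    have hsplit : List.replicate (n - r) base = base :: List.replicate (n - r - 1) base := by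
      rw [← List.replicate_succ]; congr 1; omega
    rw [hsplit]
    have hget : PySem.List.pyGetD
        (List.replicate r (base + 1) ++ base :: List.replicate (n - r - 1) base) (r : Int) 0
        = base := by
      rw [PySem.List.pyGetD_natCast]
      simp [List.getD_eq_getElem?_getD]
    have hset : PySem.List.pySetD
        (List.replicate r (base + 1) ++ base :: List.replicate (n - r - 1) base) (r : Int)
        (base + 1)
        = List.replicate (r + 1) (base + 1) ++ List.replicate (n - (r + 1)) base := by
      rw [PySem.List.pySetD_natCast]
      rw [List.set_append_right _ _ (by simp)]
      simp [List.replicate_succ' (n := r)]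
      omega
    rw [hget, hset]

-- selectLoop is find?-with-default
lemma selectLoop_eq_find (d : Int) (l : List Int) (s : Int) :
    selectLoop d l s = (l.find? (fun a => decide (d ≤ a))).getD s := by
  induction l with
  | nil => rfl
  | cons a rest ih =>
    by_cases h : d ≤ a <;> simp [selectLoop, List.find?, h, ih]

-- min of a sorted nonempty list is its head
lemma min?_of_sorted (x : Int) (t : List Int) (h : ∀ y ∈ t, x ≤ y) :
    PySem.List.min? (x :: t) (fun v => v) = some x := by
  rw [PySem.List.min?_id_cons]
  congr 1
  induction t generalizing x with
  | nil => rfl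
  | cons b tb ih =>
    have hxb : x ≤ b := h b (by simp)
    simp only [List.foldl]
    rw [min_eq_left hxb]
    exact ih x (fun y hy => h y (by simp [hy]))

-- head of a filtered list is find?
lemma head?_filter (p : Int → Bool) (l : List Int) :
    (l.filter p).head? = l.find? p := by
  induction l with
  | nil => rfl
  | cons a rest ih =>
    by_cases h : p a <;> simp [List.find?, h, ih]

-- on a ≤-sorted nonempty list, A's find-first scan equals B's min-of-filter
lemma selectLoop_eq_snap (allowed : List Int) (hs : allowed.Pairwise (· ≤ ·)) (d : Int) :
    selectLoop d allowed (PySem.List.pyGetD allowed (-1) 0) = snap allowed d := by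
  rw [selectLoop_eq_find]
  unfold snap
  by_cases hf : (allowed.filter (fun a => decide (d ≤ a))).isEmpty
  · rw [if_pos hf]
    have : allowed.find? (fun a => decide (d ≤ a)) = none := by
      rw [← head?_filter]
      simp only [List.isEmpty_iff] at hf
      simp [hf]
    simp [this]
  · rw [if_neg hf]
    simp only [List.isEmpty_iff] at hf
    obtain ⟨x, t, hxt⟩ := List.exists_cons_of_ne_nil hf
    have hsorted : (allowed.filter (fun a => decide (d ≤ a))).Pairwise (· ≤ ·) :=
      List.Pairwise.filter _ hs
    rw [hxt] at hsorted
    have hmin : PySem.List.min? (allowed.filter (fun a => decide (d ≤ a))) (fun v => v)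
        = some x := by
      rw [hxt]
      exact min?_of_sorted x t (fun y hy => List.rel_of_pairwise_cons hsorted hy)
    have hfind : allowed.find? (fun a => decide (d ≤ a)) = some x := by
      rw [← head?_filter, hxt]; rfl
    rw [hmin, hfind]
    rfl

-- every tuple stored in MODEL_ALLOWED_DURATIONS is sorted
lemma allowed_sorted (model : String) (allowed : List Int)
    (h : MODEL_ALLOWED_DURATIONS.get? model = some allowed) :
    allowed.Pairwise (· ≤ ·) := by
  have hmk : MODEL_ALLOWED_DURATIONS = PySem.Dict.mk
      [("gen4_turbo", [5, 10]),
       ("gen4.5", [2, 3, 4, 5, 6, 7, 8, 9, 10]),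
       ("gen3a_turbo", [5, 10]),
       ("veo3", [8]),
       ("veo3.1", [4, 6, 8]),
       ("veo3.1_fast", [4, 6, 8])] := by decide
  rw [hmk] at h
  simp only [PySem.Dict.get?_mk_cons] at h
  split_ifs at h
  all_goals
    first
    | (injection h with h; subst h; decide)
    | simp [PySem.Dict.get?] at h

-- ===== VERDICT (by name: the statement is the Claim_ definition above) =====
theorem plan_clip_durations_spec : Claim_equal_plan_clip_durations := by
  intro td n model _
  unfold Spec_plan_clip_durations plan_clip_durations plan_clip_durations_alt
  by_cases hn : n < 1
  · simp [hn]
  · simp only [if_neg hn]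
    have hn0 : 0 < n := by omega
    set t := max td n with ht
    have htn : ¬ t < n := by omega
    have hrem0 : 0 ≤ PySem.Int.mod t n := PySem.Int.mod_nonneg t hn0
    have hremlt : PySem.Int.mod t n < n := PySem.Int.mod_lt t hn0
    have hreq : (split_total_duration t n).getD []
        = List.replicate (PySem.Int.mod t n).toNat (PySem.Int.floordiv t n + 1)
          ++ List.replicate (n.toNat - (PySem.Int.mod t n).toNat) (PySem.Int.floordiv t n) := by
      unfold split_total_duration
      rw [if_neg hn, if_neg htn]
      simp only [Option.getD_some]
      rw [PySem.List.pyRepeat_singleton,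
        show PySem.Int.mod t n = ((PySem.Int.mod t n).toNat : Int) by omega]
      exact increment_loop_eq _ _ _ (by omega)
    have hrepl : ∀ x y : Int,
        PySem.List.pyRepeat [x] (PySem.Int.mod t n) ++ PySem.List.pyRepeat [y] (n - PySem.Int.mod t n)
        = List.replicate (PySem.Int.mod t n).toNat x
          ++ List.replicate (n.toNat - (PySem.Int.mod t n).toNat) y := by
      intro x y
      rw [PySem.List.pyRepeat_singleton, PySem.List.pyRepeat_singleton]
      congr 1
      congr 1
      omega
    cases hget : MODEL_ALLOWED_DURATIONS.get? model with
    | none => simp only [hreq, hrepl]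
    | some allowed =>
      have hs := allowed_sorted model allowed hget
      by_cases hemp : allowed.isEmpty
      · simp only [if_pos hemp, hreq, hrepl]
      · simp only [if_neg hemp, hreq, hrepl]
        rw [PySem.List.foldl_append_singleton_eq_map]
        simp only [List.nil_append, List.map_append, List.map_replicate]
        rw [selectLoop_eq_snap allowed hs, selectLoop_eq_snap allowed hs]
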